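-- pv_equiv track=rewrite | github.com/bambouzel/sms_daemon | src/sms.py | getQuoted
-- ===== SOURCE A (Python) =====
-- def getQuoted(message, index):
--     i=1
--     start=0
--     while i<=index:
--         start=message.find("\"", start)
--         if (start==-1):
--             return None
--         end=message.find("\"", start+1)
--         if (end==-1):
--             return None
--         if (i==index):
--             return message[start+1:end]
--         start=end+1
--         i=i+1
--     return None
-- ===== SOURCE B (Python) =====
-- def getQuoted(message, index):
--     if index < 1:
--         return None
--     target = 2 * index
--     count = 0
--     buf = []
--     for ch in message:
--         if ch == '"':
--             count += 1
--             if count == target: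
--                 return ''.join(buf)
--         elif count == target - 1:
--             buf.append(ch)
--     return None
-- ===== Notes on version B (the rewrite author's own statement) =====
-- stated objective: alternative
-- what changed: A repeatedly calls str.find to locate each pair of quotes and slices the result out; B makes a single character-by-character pass keeping a count of quotes seen and collecting characters while inside the index-th quoted region.
import Mathlib
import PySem

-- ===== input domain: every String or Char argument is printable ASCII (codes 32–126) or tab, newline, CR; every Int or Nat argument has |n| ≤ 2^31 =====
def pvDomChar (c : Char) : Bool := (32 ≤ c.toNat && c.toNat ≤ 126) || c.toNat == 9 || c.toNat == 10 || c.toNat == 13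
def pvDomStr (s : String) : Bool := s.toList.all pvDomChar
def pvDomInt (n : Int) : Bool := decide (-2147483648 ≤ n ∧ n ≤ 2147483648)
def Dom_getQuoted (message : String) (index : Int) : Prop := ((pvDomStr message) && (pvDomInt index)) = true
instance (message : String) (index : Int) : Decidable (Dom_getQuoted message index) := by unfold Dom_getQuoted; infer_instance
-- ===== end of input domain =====

-- B replaces A's repeated find/slice pair-scan by a single character pass with a quote counter; objective: alternative (same cost, different structure).

-- ===== PORT A =====
-- A's while-loop: each iteration finds the next pair of quotes with str.find.
def getQuotedLoop (message : String) (index : Int) (i : Int) (start : Int) : Option String :=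
  if h : i ≤ index then
    let start' := PySem.Str.findFrom message "\"" start
    if start' = -1 then none
    else
      let e := PySem.Str.findFrom message "\"" (start' + 1)
      if e = -1 then none
      else if i = index then some (PySem.Str.slice message (some (start' + 1)) (some e))
      else getQuotedLoop message index (i + 1) (e + 1)
  else none
termination_by (index + 1 - i).toNat
decreasing_by omega

def getQuoted (message : String) (index : Int) : Option String :=
  getQuotedLoop message index 1 0

-- ===== PORT B =====
-- B's for-loop over the characters: count quotes seen, collect chars while inside the index-th pair.
def getQuotedScan (target : Int) (cs : List Char) (count : Int) (buf : List Char) : Option String :=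
  match cs with
  | [] => none
  | c :: rest =>
    if c = '"' then
      if count + 1 = target then some (String.ofList buf)
      else getQuotedScan target rest (count + 1) buf
    else if count = target - 1 then getQuotedScan target rest count (buf ++ [c])
    else getQuotedScan target rest count buf

def getQuoted_alt (message : String) (index : Int) : Option String :=
  if index < 1 then none
  else getQuotedScan (2 * index) message.toList 0 []

-- ===== PRECONDITION & SPEC =====
def Spec_getQuoted (message : String) (index : Int) (out : Option String) : Prop := out = getQuoted_alt message index
instance (message : String) (index : Int) (out : Option String) : Decidable (Spec_getQuoted message index out) := by unfold Spec_getQuoted; infer_instance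

-- ===== CLAIM (what is proved, stated in full; the proofs are below) =====
def Claim_equal_getQuoted : Prop := ∀ (message : String) (index : Int), Dom_getQuoted message index → Spec_getQuoted message index (getQuoted message index)

-- ===== LEMMAS AND PROOFS =====

lemma pvQuoteToList : ("\"" : String).toList = ['"'] := by decide

lemma scan_none_of_no_quote (t : Int) : ∀ (cs : List Char) (count : Int) (buf : List Char),
    '"' ∉ cs → getQuotedScan t cs count buf = none := by
  intro cs
  induction cs with
  | nil => intro count buf _; rfl
  | cons c rest ih =>
    intro count buf h
    simp only [List.mem_cons, not_or] at h
    have hc : ¬ c = '"' := fun e => h.1 e.symm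
    simp only [getQuotedScan, if_neg hc]
    split_ifs <;> exact ih _ _ h.2

lemma scan_none_of_ge (t : Int) : ∀ (cs : List Char) (count : Int) (buf : List Char),
    t ≤ count → getQuotedScan t cs count buf = none := by
  intro cs
  induction cs with
  | nil => intro count buf _; rfl
  | cons c rest ih =>
    intro count buf h
    simp only [getQuotedScan]
    split_ifs with h1 h2 h3
    · omega
    · exact ih _ _ (by omega)
    · omega
    · exact ih _ _ h

lemma scan_skip (t : Int) : ∀ (p cs : List Char) (count : Int) (buf : List Char),
    '"' ∉ p → count ≠ t - 1 →
    getQuotedScan t (p ++ cs) count buf = getQuotedScan t cs count buf := by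
  intro p
  induction p with
  | nil => intro cs count buf _ _; rfl
  | cons c rest ih =>
    intro cs count buf hp hcnt
    simp only [List.mem_cons, not_or] at hp
    have hc : ¬ c = '"' := fun e => hp.1 e.symm
    simp only [List.cons_append, getQuotedScan, if_neg hc, if_neg hcnt]
    exact ih cs count buf hp.2 hcnt

lemma scan_collect (t : Int) : ∀ (p cs : List Char) (buf : List Char),
    '"' ∉ p →
    getQuotedScan t (p ++ cs) (t - 1) buf = getQuotedScan t cs (t - 1) (buf ++ p) := by
  intro p
  induction p with
  | nil => intro cs buf _; simp
  | cons c rest ih =>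
    intro cs buf hp
    simp only [List.mem_cons, not_or] at hp
    have hc : ¬ c = '"' := fun e => hp.1 e.symm
    simp only [List.cons_append, getQuotedScan, if_neg hc, if_true]
    rw [ih cs (buf ++ [c]) hp.2]
    simp

lemma first_occ {α : Type} [DecidableEq α] (q : α) : ∀ (l : List α), q ∈ l →
    ∃ p r, l = p ++ q :: r ∧ q ∉ p := by
  intro l
  induction l with
  | nil => intro h; cases h
  | cons c rest ih =>
    intro h
    by_cases hc : c = q
    · exact ⟨[], rest, by simp [hc], by simp⟩
    · have hq : q ∈ rest := by
        rcases List.mem_cons.mp h with h1 | h1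
        · exact absurd h1.symm hc
        · exact h1
      obtain ⟨p, r, h1, h2⟩ := ih hq
      refine ⟨c :: p, r, by simp [h1], ?_⟩
      simp only [List.mem_cons, not_or]
      exact ⟨fun e => hc e.symm, h2⟩

lemma find_none_of_not_mem (l : List Char) (q : Char) (h : q ∉ l) :
    PySem.Chars.find l [q] = -1 := by
  rw [PySem.Chars.find_eq_neg_one_iff]
  intro hinf
  exact h (hinf.subset (by simp))

lemma find_first (p r : List Char) (q : Char) (hp : q ∉ p) :
    PySem.Chars.find (p ++ q :: r) [q] = (p.length : Int) := by
  have hmem : [q] <:+: (p ++ q :: r) := ⟨p, r, by simp⟩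
  have hne : PySem.Chars.find (p ++ q :: r) [q] ≠ -1 :=
    (PySem.Chars.find_ne_neg_one_iff _ _).2 hmem
  have h0 : PySem.Chars.findFrom (p ++ q :: r) [q] ((0 : Nat) : Int) =
      PySem.Chars.find (p ++ q :: r) [q] := by
    simp [PySem.Chars.findFrom_zero]
  obtain ⟨h1, h2, h3⟩ :=
    PySem.Chars.findFrom_natCast_spec (p ++ q :: r) [q] 0 (Nat.zero_le _) (by rw [h0]; exact hne)
  rw [h0] at h1 h2 h3
  set n := (PySem.Chars.find (p ++ q :: r) [q]).toNat with hn
  have hle : n ≤ p.length := by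
    by_contra hgt
    exact h3 p.length (Nat.zero_le _) (by omega) (by rw [List.drop_left]; exact ⟨r, rfl⟩)
  have hge : p.length ≤ n := by
    by_contra hlt
    have hd : (p ++ q :: r).drop n = p.drop n ++ q :: r :=
      List.drop_append_of_le_length (by omega)
    have hdp : p.drop n = p[n] :: p.drop (n + 1) := List.drop_eq_getElem_cons (by omega)
    rw [hd, hdp] at h2
    have heq : q = p[n] := (List.cons_prefix_cons.mp h2).1
    apply hp
    rw [heq]
    exact List.getElem_mem _
  have hfin : PySem.Chars.find (p ++ q :: r) [q] = (n : Int) := (Int.toNat_of_nonneg h1).symm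
  have hnp : n = p.length := le_antisymm hle hge
  rw [hfin, hnp]

lemma drop_past (p r : List Char) (c : Char) : (p ++ c :: r).drop (p.length + 1) = r := by
  have h1 : p ++ c :: r = (p ++ [c]) ++ r := by simp
  have h2 : p.length + 1 = (p ++ [c]).length := by simp
  rw [h1, h2, List.drop_left]

lemma scan_quote_step (t : Int) (cs : List Char) (count : Int) (buf : List Char)
    (h : ¬ count + 1 = t) :
    getQuotedScan t ('"' :: cs) count buf = getQuotedScan t cs (count + 1) buf := by
  simp [getQuotedScan, h]

lemma scan_quote_hit (t : Int) (cs : List Char) (count : Int) (buf : List Char)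
    (h : count + 1 = t) :
    getQuotedScan t ('"' :: cs) count buf = some (String.ofList buf) := by
  simp [getQuotedScan, h]

-- the main invariant: A's loop at (i, start = ↑s) equals B's scan on the suffix with count 2*(i-1)
lemma loop_eq_scan (message : String) (index : Int) :
    ∀ (n : Nat) (i : Int) (s : Nat), (index - i).toNat = n → s ≤ message.toList.length →
    getQuotedLoop message index i (s : Int) =
      getQuotedScan (2 * index) (message.toList.drop s) (2 * (i - 1)) [] := by
  intro n
  induction n using Nat.strong_induction_on with
  | _ n ih =>
  intro i s hn hs
  by_cases hi : i ≤ index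
  case neg =>
    rw [getQuotedLoop, dif_neg hi]
    exact (scan_none_of_ge _ _ _ _ (by omega)).symm
  case pos =>
  rw [getQuotedLoop, dif_pos hi]
  simp only [PySem.Str.findFrom_eq, pvQuoteToList]
  set l := message.toList with hl
  rw [PySem.Chars.findFrom_natCast l ['"'] s hs]
  by_cases hq : '"' ∈ l.drop s
  case neg =>
    rw [find_none_of_not_mem _ _ hq]
    rw [if_pos rfl, if_pos rfl]
    exact (scan_none_of_no_quote _ _ _ _ hq).symm
  case pos =>
  obtain ⟨p, r, hrest, hp⟩ := first_occ '"' (l.drop s) hq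
  have hlen : l.length = s + p.length + 1 + r.length := by
    have h1 : (l.drop s).length = l.length - s := List.length_drop ..
    rw [hrest] at h1
    simp at h1
    omega
  rw [hrest, find_first p r '"' hp]
  rw [if_neg (show ¬ ((p.length : Int) = -1) by omega),
      if_neg (show ¬ ((s : Int) + (p.length : Int) = -1) by omega)]
  have hc1 : ((s : Int) + (p.length : Int) + 1) = ((s + p.length + 1 : Nat) : Int) := by
    push_cast; ring
  rw [hc1]
  have hj : s + p.length + 1 ≤ l.length := by omega
  have hdropj : l.drop (s + p.length + 1) = r := by
    have h1 : s + p.length + 1 = s + (p.length + 1) := by omega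
    rw [h1, ← List.drop_drop, hrest, drop_past]
  rw [PySem.Chars.findFrom_natCast l ['"'] (s + p.length + 1) hj, hdropj]
  by_cases hq2 : '"' ∈ r
  case neg =>
    rw [find_none_of_not_mem _ _ hq2]
    rw [if_pos rfl, if_pos rfl]
    rw [scan_skip _ p _ _ _ hp (by omega)]
    rw [scan_quote_step _ _ _ _ (by omega)]
    exact (scan_none_of_no_quote _ _ _ _ hq2).symm
  case pos =>
  obtain ⟨p2, r2, hr, hp2⟩ := first_occ '"' r hq2
  have hlen2 : r.length = p2.length + 1 + r2.length := by simp [hr]; omega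
  rw [hr, find_first p2 r2 '"' hp2]
  rw [if_neg (show ¬ ((p2.length : Int) = -1) by omega),
      if_neg (show ¬ (((s + p.length + 1 : Nat) : Int) + (p2.length : Int) = -1) by omega)]
  rw [scan_skip _ p _ _ _ hp (by omega)]
  by_cases hii : i = index
  case pos =>
    subst hii
    rw [if_pos rfl]
    rw [scan_quote_step _ _ _ _ (by omega)]
    rw [show (2*(i-1) + 1 : Int) = 2*i - 1 by ring]
    rw [scan_collect _ p2 _ _ hp2]
    rw [scan_quote_hit _ _ _ _ (by ring), List.nil_append]
    congr 1
    unfold PySem.Str.slice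
    rw [PySem.Chars.slice_eq_listSlice, ← hl, PySem.List.slice_natCast_add, hdropj, hr,
        List.take_left]
  case neg =>
    rw [if_neg hii]
    have hc2 : ((s + p.length + 1 : Nat) : Int) + (p2.length : Int) + 1 =
        ((s + p.length + 1 + p2.length + 1 : Nat) : Int) := by push_cast; ring
    rw [hc2]
    have hs' : s + p.length + 1 + p2.length + 1 ≤ l.length := by omega
    rw [ih (index - (i+1)).toNat (by omega) (i+1) _ rfl hs']
    have hdrop2 : l.drop (s + p.length + 1 + p2.length + 1) = r2 := by
      have h1 : s + p.length + 1 + p2.length + 1 = (s + p.length + 1) + (p2.length + 1) := by omega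
      rw [h1, ← List.drop_drop, hdropj, hr, drop_past]
    rw [hdrop2]
    rw [scan_quote_step _ _ _ _ (by omega)]
    rw [scan_skip _ p2 _ _ _ hp2 (by omega)]
    rw [scan_quote_step _ _ _ _ (by omega)]
    congr 1
    ring

-- ===== VERDICT (by name: the statement is the Claim_ definition above) =====
theorem getQuoted_spec : Claim_equal_getQuoted := by
  intro message index _
  unfold Spec_getQuoted getQuoted getQuoted_alt
  have h := loop_eq_scan message index (index - 1).toNat 1 0 rfl (Nat.zero_le _)
  simp only [Nat.cast_zero, List.drop_zero] at h
  rw [h]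
  by_cases hidx : index < 1
  · rw [if_pos hidx]
    exact scan_none_of_ge _ _ _ _ (by omega)
  · rw [if_neg hidx]
    norm_num
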